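-- pv_equiv track=rewrite | github.com/HimanshuLadva/Python-DSA | Leetcode/daily/202512/20251202.py | countTrapezoidsV1
-- ===== SOURCE A (Python) =====
-- from typing import List
--
-- def countTrapezoidsV1(points: List[List[int]]) -> int:
--     points.sort(key=lambda x: x[1])
--     lookup = {}
--
--     for point in points:
--         if point[1] not in lookup:
--             lookup[point[1]] = 0
--         lookup[point[1]] += 1
--
--     temp = []
--     for x in lookup:
--         if lookup[x] >= 2:
--             temp.append((lookup[x] * (lookup[x] - 1))//2)
--
--     sum_all = sum(temp)
--     sum_squares = sum(x**2 for x in temp)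
--     result = (sum_all**2 - sum_squares) // 2
--
--     return result
-- ===== SOURCE B (Python) =====
-- from typing import List
--
-- def countTrapezoidsV1(points: List[List[int]]) -> int:
--     points.sort(key=lambda x: x[1])
--     # after sorting by y, equal y-values are adjacent: scan the runs directly
--     # (no dictionary, no temp list), accumulating the sum of distinct-pair
--     # products incrementally with two running integers.
--     n = len(points)
--     acc = 0
--     total = 0
--     i = 0
--     while i < n:
--         j = i + 1
--         while j < n and points[j][1] == points[i][1]:
--             j += 1
--         c = j - i
--         if c >= 2:
--             pair = c * (c - 1) // 2
--             total += pair * acc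
--             acc += pair
--         i = j
--     return total
-- ===== Notes on version B (the rewrite author's own statement) =====
-- stated objective: alternative
-- what changed: Drops A's dictionary and temp list entirely: since the list is sorted by y, B scans the runs of equal y-values in one index pass and accumulates the sum of distinct-pair products incrementally with two running integers, instead of A's hash-count plus (sum^2 - sum_of_squares)//2 closed form.
import Mathlib
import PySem

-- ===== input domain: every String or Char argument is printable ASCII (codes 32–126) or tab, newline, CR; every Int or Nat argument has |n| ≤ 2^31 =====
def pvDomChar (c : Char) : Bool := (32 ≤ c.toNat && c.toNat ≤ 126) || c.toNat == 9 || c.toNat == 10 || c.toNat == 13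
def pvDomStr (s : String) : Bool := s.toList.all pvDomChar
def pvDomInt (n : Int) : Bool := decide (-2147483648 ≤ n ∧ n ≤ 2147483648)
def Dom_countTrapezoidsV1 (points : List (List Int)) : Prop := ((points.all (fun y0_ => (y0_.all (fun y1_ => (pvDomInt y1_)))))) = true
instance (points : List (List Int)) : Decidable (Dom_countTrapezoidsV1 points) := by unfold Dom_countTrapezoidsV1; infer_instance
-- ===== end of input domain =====

-- B drops A's dictionary and temp list: after the same sort by y it scans runs of equal
-- y-values once, accumulating the pair-product sum incrementally; A's in-place sort of
-- `points` is a mutation B performs identically, the theorems are about the return value.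


-- ===== PORT A =====
def countTrapezoidsV1 (points : List (List Int)) : Int :=
  let pts := PySem.List.sorted points (fun x => PySem.List.pyGetD x 1 0) false
  let lookup := pts.foldl (fun d point =>
      let y := PySem.List.pyGetD point 1 0
      let d := if d.contains y then d else d.insert y 0
      d.insert y (d.getD y 0 + 1)) (PySem.Dict.empty : PySem.Dict Int Int)
  let temp := lookup.keys.foldl (fun temp x =>
      if 2 ≤ lookup.getD x 0 then
        temp ++ [PySem.Int.floordiv (lookup.getD x 0 * (lookup.getD x 0 - 1)) 2]
      else temp) []
  let sum_all := temp.sum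
  let sum_squares := (temp.map (fun x => x ^ 2)).sum
  PySem.Int.floordiv (sum_all ^ 2 - sum_squares) 2

-- ===== PORT B =====
-- B's outer while loop: each step consumes one run of equal y-values (the inner while)
def pvRunLoop (l : List (List Int)) (acc total : Int) : Int :=
  match l with
  | [] => total
  | p :: rest =>
    let y := PySem.List.pyGetD p 1 0
    let run := rest.takeWhile (fun q => PySem.List.pyGetD q 1 0 == y)
    let rest' := rest.dropWhile (fun q => PySem.List.pyGetD q 1 0 == y)
    let c : Int := 1 + run.length
    if 2 ≤ c then
      let pair := PySem.Int.floordiv (c * (c - 1)) 2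
      pvRunLoop rest' (acc + pair) (total + pair * acc)
    else pvRunLoop rest' acc total
termination_by l.length
decreasing_by
  all_goals
    exact Nat.lt_succ_of_le (List.Sublist.length_le (List.dropWhile_sublist _))

def countTrapezoidsV1_alt (points : List (List Int)) : Int :=
  let pts := PySem.List.sorted points (fun x => PySem.List.pyGetD x 1 0) false
  pvRunLoop pts 0 0

-- ===== PRECONDITION & SPEC =====
-- Pre_ excludes exactly the inputs where Python A raises IndexError (a point with fewer than 2 coordinates).
def Pre_countTrapezoidsV1 (points : List (List Int)) : Prop := ∀ p ∈ points, 2 ≤ p.length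
instance (points : List (List Int)) : Decidable (Pre_countTrapezoidsV1 points) := by unfold Pre_countTrapezoidsV1; infer_instance
def pvWitness_countTrapezoidsV1 : List (List Int) := [[0, 1], [2, 1], [0, 3], [2, 3]]

def Spec_countTrapezoidsV1 (points : List (List Int)) (out : Int) : Prop := out = countTrapezoidsV1_alt points
instance (points : List (List Int)) (out : Int) : Decidable (Spec_countTrapezoidsV1 points out) := by unfold Spec_countTrapezoidsV1; infer_instance

-- ===== CLAIM (what is proved, stated in full; the proofs are below) =====
def Claim_equal_countTrapezoidsV1 : Prop := ∀ (points : List (List Int)), Dom_countTrapezoidsV1 points → Pre_countTrapezoidsV1 points → Spec_countTrapezoidsV1 points (countTrapezoidsV1 points)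

-- ===== LEMMAS AND PROOFS =====

-- sum of products of distinct pairs of a list, front element times the rest
def pvSP : List Int → Int
  | [] => 0
  | x :: xs => x * xs.sum + pvSP xs

-- the per-y pair counts kept by both programs
def pvTs (cs : List Int) : List Int :=
  (cs.filter (fun c => decide (2 ≤ c))).map (fun c => PySem.Int.floordiv (c * (c - 1)) 2)

-- run lengths of a list of y-values
def pvRC : List Int → List Int
  | [] => []
  | y :: t =>
      (1 + ((t.takeWhile (fun z => z == y)).length : Int)) :: pvRC (t.dropWhile (fun z => z == y))
termination_by l => l.length
decreasing_by
  exact Nat.lt_succ_of_le (List.Sublist.length_le (List.dropWhile_sublist _))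

-- the y-projection both programs sort and group by
def pvKey (p : List Int) : Int := PySem.List.pyGetD p 1 0

theorem pvSq (ts : List Int) :
    ts.sum ^ 2 - (ts.map (fun x => x ^ 2)).sum = 2 * pvSP ts := by
  induction ts with
  | nil => simp [pvSP]
  | cons x xs ih =>
    simp only [List.sum_cons, List.map_cons, pvSP]
    linear_combination ih

theorem pvFoldA {α : Type} (l : List α) (v : α → Int) (acc : List Int) :
    l.foldl (fun temp x =>
      if 2 ≤ v x then temp ++ [PySem.Int.floordiv (v x * (v x - 1)) 2] else temp) acc
    = acc ++ pvTs (l.map v) := by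
  induction l generalizing acc with
  | nil => simp [pvTs]
  | cons x l ih =>
    rw [List.foldl_cons]
    by_cases h : 2 ≤ v x
    · rw [if_pos h, ih]; simp [pvTs, h]
    · rw [if_neg h, ih]; simp [pvTs, h]

-- B's run loop computes the incremental pair-product sum over the run lengths
theorem pvRunLoop_eq (n : Nat) (l : List (List Int)) (hl : l.length = n) (acc total : Int) :
    pvRunLoop l acc total
      = total + acc * (pvTs (pvRC (l.map pvKey))).sum + pvSP (pvTs (pvRC (l.map pvKey))) := by
  induction n using Nat.strong_induction_on generalizing l acc total with
  | _ n ih =>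
    match l, hl with
    | [], _ => simp [pvRunLoop, pvRC, pvTs, pvSP]
    | p :: rest, hl =>
      rw [pvRunLoop, List.map_cons, pvRC]
      have htake : (rest.map pvKey).takeWhile (fun z => z == pvKey p)
          = (rest.takeWhile (fun q => PySem.List.pyGetD q 1 0 == PySem.List.pyGetD p 1 0)).map pvKey := by
        rw [List.takeWhile_map]; rfl
      have hdrop : (rest.map pvKey).dropWhile (fun z => z == pvKey p)
          = (rest.dropWhile (fun q => PySem.List.pyGetD q 1 0 == PySem.List.pyGetD p 1 0)).map pvKey := by
        rw [List.dropWhile_map]; rfl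
      rw [htake, hdrop, List.length_map]
      set rest' := rest.dropWhile (fun q => PySem.List.pyGetD q 1 0 == PySem.List.pyGetD p 1 0) with hrest'
      set c : Int := 1 + ((rest.takeWhile (fun q => PySem.List.pyGetD q 1 0 == PySem.List.pyGetD p 1 0)).length : Int) with hc
      have hlen : rest'.length < n := by
        have hle := List.Sublist.length_le (List.dropWhile_sublist
          (p := fun q => PySem.List.pyGetD q 1 0 == PySem.List.pyGetD p 1 0) (l := rest))
        rw [← hrest'] at hle
        have hln : rest.length + 1 = n := by simpa using hl
        omega
      by_cases h2 : 2 ≤ c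
      · rw [if_pos h2]
        have hts : pvTs (c :: pvRC (rest'.map pvKey))
            = PySem.Int.floordiv (c * (c - 1)) 2 :: pvTs (pvRC (rest'.map pvKey)) := by
          simp [pvTs, h2]
        rw [ih rest'.length hlen rest' rfl, hts]
        simp only [List.sum_cons, pvSP]
        ring
      · rw [if_neg h2]
        have hts : pvTs (c :: pvRC (rest'.map pvKey)) = pvTs (pvRC (rest'.map pvKey)) := by
          simp [pvTs, h2]
        rw [ih rest'.length hlen rest' rfl, hts]

-- in a sorted tail every element surviving the dropWhile of the head's run is strictly larger
theorem pvDropPos (t : List Int) (y : Int) (h1 : ∀ z ∈ t, y ≤ z)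
    (h2 : t.Pairwise (· ≤ ·)) : ∀ z ∈ t.dropWhile (fun z => z == y), y < z := by
  induction t with
  | nil => simp
  | cons a t ihh =>
    by_cases ha : a = y
    · rw [List.dropWhile_cons_of_pos (by simp [ha])]
      exact ihh (fun z hz => h1 z (List.mem_cons_of_mem _ hz)) (List.Pairwise.of_cons h2)
    · rw [List.dropWhile_cons_of_neg (by simp [ha])]
      intro z hz
      have hya : y < a := lt_of_le_of_ne (h1 a List.mem_cons_self) (fun e => ha e.symm)
      rcases List.mem_cons.mp hz with rfl | hz'
      · exact hya
      · exact lt_of_lt_of_le hya ((List.pairwise_cons.mp h2).1 z hz')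

theorem pvFoldAddCons (l : List Int) (y : Int) (s : List Int) (h : y ∉ l) :
    l.foldl PySem.Set.add (y :: s) = y :: l.foldl PySem.Set.add s := by
  induction l generalizing s with
  | nil => rfl
  | cons a l ihh =>
    have hay : a ≠ y := fun e => h (e ▸ List.mem_cons_self)
    have hstep : PySem.Set.add (y :: s) a = y :: PySem.Set.add s a := by
      simp only [PySem.Set.add, PySem.Set.contains, List.contains_cons]
      have hb : (a == y) = false := by simp [hay]
      rw [hb]
      simp only [Bool.false_or]
      split <;> rfl
    rw [List.foldl_cons, List.foldl_cons, hstep]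
    exact ihh (PySem.Set.add s a) (fun hm => h (List.mem_cons_of_mem _ hm))

theorem pvFoldAddConst (l : List Int) (y : Int) (h : ∀ z ∈ l, z = y) :
    l.foldl PySem.Set.add [y] = [y] := by
  induction l with
  | nil => rfl
  | cons a l ihh =>
    have hst : PySem.Set.add [y] a = [y] := by
      have := h a List.mem_cons_self
      simp [PySem.Set.add, PySem.Set.contains, this]
    rw [List.foldl_cons, hst, ihh (fun z hz => h z (List.mem_cons_of_mem _ hz))]

-- on a sorted (Pairwise ≤) list the run lengths are exactly the per-value counts,
-- taken over the distinct values in first-occurrence order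
theorem pvRC_sorted (n : Nat) (ys : List Int) (hl : ys.length = n)
    (hs : ys.Pairwise (· ≤ ·)) :
    pvRC ys = (PySem.List.dedup ys).map (fun y => (ys.count y : Int)) := by
  induction n using Nat.strong_induction_on generalizing ys with
  | _ n ih =>
    match ys, hl with
    | [], _ => simp [pvRC]
    | y :: t, hl =>
      have h1 : ∀ z ∈ t, y ≤ z := (List.pairwise_cons.mp hs).1
      have h2 : t.Pairwise (· ≤ ·) := (List.pairwise_cons.mp hs).2
      set tw := t.takeWhile (fun z => z == y) with htw
      set dw := t.dropWhile (fun z => z == y) with hdw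
      have htweq : ∀ z ∈ tw, z = y := by
        intro z hz
        have := List.mem_takeWhile_imp hz
        simpa using this
      have hdwpos : ∀ z ∈ dw, y < z := pvDropPos t y h1 h2
      have hydw : y ∉ dw := fun hm => lt_irrefl y (hdwpos y hm)
      have hsplit : tw ++ dw = t := List.takeWhile_append_dropWhile
      have hdwsorted : dw.Pairwise (· ≤ ·) :=
        List.Pairwise.sublist (List.dropWhile_sublist _) h2
      have hdwlen : dw.length < n := by
        have hle := List.Sublist.length_le (List.dropWhile_sublist (p := fun z => z == y) (l := t))
        rw [← hdw] at hle
        have hln : t.length + 1 = n := by simpa using hl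
        omega
      -- the dedup of the sorted list is the head followed by the dedup of the later runs
      have hded : PySem.List.dedup (y :: t) = y :: PySem.List.dedup dw := by
        simp only [PySem.List.dedup_eq_ofList, PySem.Set.ofList_eq_foldl]
        rw [List.foldl_cons]
        have h0 : PySem.Set.add [] y = [y] := rfl
        rw [h0, ← hsplit, List.foldl_append, pvFoldAddConst tw y htweq]
        exact pvFoldAddCons dw y [] hydw
      -- head count
      have hcnty : ((y :: t).count y : Int) = 1 + (tw.length : Int) := by
        have htc : t.count y = tw.length + dw.count y := by
          rw [← hsplit, List.count_append]
          congr 1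
          exact List.count_eq_length.mpr (fun b hb => (htweq b hb).symm)
        have hdc : dw.count y = 0 := List.count_eq_zero.mpr hydw
        rw [List.count_cons_self, htc, hdc]
        push_cast
        ring
      -- later counts
      have hcnt : ∀ z ∈ PySem.List.dedup dw, ((y :: t).count z : Int) = (dw.count z : Int) := by
        intro z hz
        have hzdw : z ∈ dw := (PySem.List.mem_dedup dw z).mp hz
        have hzy : z ≠ y := fun e => lt_irrefl y (e ▸ hdwpos z hzdw)
        have h0 : tw.count z = 0 := List.count_eq_zero.mpr (fun hm => hzy (htweq z hm))
        have heq : (y :: t).count z = dw.count z := by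
          rw [List.count_cons_of_ne (Ne.symm hzy), ← hsplit, List.count_append, h0,
            Nat.zero_add]
        exact_mod_cast heq
      rw [pvRC, hded, List.map_cons, hcnty,
        List.map_congr_left hcnt, ← ih dw.length hdwlen dw rfl hdwsorted]

-- A's counting dict is Counter of the y-values
theorem pvBuildEq (l : List (List Int)) :
    l.foldl (fun d point =>
      let y := PySem.List.pyGetD point 1 0
      let d := if d.contains y then d else d.insert y 0
      d.insert y (d.getD y 0 + 1)) (PySem.Dict.empty : PySem.Dict Int Int)
    = PySem.Dict.counter (l.map pvKey) := by
  rw [← PySem.Dict.foldl_insert_getD_add_one_eq_counter, List.foldl_map]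
  apply PySem.List.foldl_congr_mem
  intro d p _
  by_cases h : d.contains (PySem.List.pyGetD p 1 0)
  · simp only [pvKey, h, if_true]
  · simp only [pvKey, h, if_false, Bool.false_eq_true]
    rw [PySem.Dict.getD_insert_self, PySem.Dict.insert_insert_self,
      PySem.Dict.getD_of_not_contains d 0 (by simpa using h)]

-- ===== VERDICT (by name: the statement is the Claim_ definition above) =====
theorem countTrapezoidsV1_spec : Claim_equal_countTrapezoidsV1 := by
  intro points _ _
  show countTrapezoidsV1 points = countTrapezoidsV1_alt points
  simp only [countTrapezoidsV1, countTrapezoidsV1_alt]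
  set pts := PySem.List.sorted points (fun x => PySem.List.pyGetD x 1 0) false with hpts
  have hbuild := pvBuildEq pts
  simp only [] at hbuild
  rw [hbuild, PySem.Dict.keys_counter]
  set ys := pts.map pvKey with hys
  have hcongr : ∀ (acc : List Int) (x : Int), x ∈ PySem.Set.ofList ys →
      (if 2 ≤ (PySem.Dict.counter ys).getD x 0 then
        acc ++ [PySem.Int.floordiv ((PySem.Dict.counter ys).getD x 0 *
          ((PySem.Dict.counter ys).getD x 0 - 1)) 2]
      else acc)
      = (if 2 ≤ (ys.count x : Int) then
          acc ++ [PySem.Int.floordiv ((ys.count x : Int) * ((ys.count x : Int) - 1)) 2]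
        else acc) := by
    intro acc x _
    rw [PySem.Dict.getD_counter]
  rw [PySem.List.foldl_congr_mem (PySem.Set.ofList ys)
      (fun acc x => if 2 ≤ (PySem.Dict.counter ys).getD x 0 then
        acc ++ [PySem.Int.floordiv ((PySem.Dict.counter ys).getD x 0 *
          ((PySem.Dict.counter ys).getD x 0 - 1)) 2]
      else acc)
      (fun acc x => if 2 ≤ (ys.count x : Int) then
        acc ++ [PySem.Int.floordiv ((ys.count x : Int) * ((ys.count x : Int) - 1)) 2]
      else acc)
      [] hcongr,
    pvFoldA (PySem.Set.ofList ys) (fun x => (ys.count x : Int)) [], List.nil_append]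
  have hsorted : ys.Pairwise (· ≤ ·) := by
    rw [hys, hpts]
    exact PySem.List.sorted_map_key_pairwise points pvKey
  have hrc := pvRC_sorted ys.length ys rfl hsorted
  rw [PySem.List.dedup_eq_ofList] at hrc
  have hrun := pvRunLoop_eq pts.length pts rfl 0 0
  rw [← hys] at hrun
  rw [hrun, hrc, pvSq, PySem.Int.floordiv_eq_ediv_of_pos (by norm_num),
    Int.mul_ediv_cancel_left _ (by norm_num : (2 : Int) ≠ 0)]
  ring
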